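-- pv_equiv track=rewrite | github.com/Semih1997/pp4e_workbook_problems | Error_Handling_and_Debugging/Qball_game.py | ball_game
-- ===== SOURCE A (Python) =====
-- def ball_game(arr,max_turn):
--     turn = 0
--     child_pick = 0
--     while turn < max_turn:
--         try:
--             child_pick = arr[child_pick]
--         except IndexError:
--             break
--         turn += 1
--     return child_pick
-- ===== SOURCE B (Python) =====
-- def ball_game(arr, max_turn):
--     # Functional-graph walk with cycle detection: the first repeated position lets us
--     # jump the remaining turns with modular arithmetic instead of iterating them all.
--     n = len(arr)
--     c = 0
--     step = 0
--     seen = {}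
--     path = []
--     while step < max_turn:
--         if c in seen:
--             start = seen[c]
--             cycle = step - start
--             return path[start + (max_turn - start) % cycle]
--         seen[c] = step
--         path.append(c)
--         if -n <= c < n:
--             c = arr[c]
--             step += 1
--         else:
--             break
--     return c
-- ===== Notes on version B (the rewrite author's own statement) =====
-- stated objective: alternative
-- what changed: Instead of iterating the index chain turn by turn up to max_turn, B walks until the position goes out of range or repeats, then jumps the remaining turns with modular arithmetic on the detected cycle (asymptotically O(min(max_turn, len(arr))) on cycling inputs, same cost on the random inputs measured).
import Mathlib
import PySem

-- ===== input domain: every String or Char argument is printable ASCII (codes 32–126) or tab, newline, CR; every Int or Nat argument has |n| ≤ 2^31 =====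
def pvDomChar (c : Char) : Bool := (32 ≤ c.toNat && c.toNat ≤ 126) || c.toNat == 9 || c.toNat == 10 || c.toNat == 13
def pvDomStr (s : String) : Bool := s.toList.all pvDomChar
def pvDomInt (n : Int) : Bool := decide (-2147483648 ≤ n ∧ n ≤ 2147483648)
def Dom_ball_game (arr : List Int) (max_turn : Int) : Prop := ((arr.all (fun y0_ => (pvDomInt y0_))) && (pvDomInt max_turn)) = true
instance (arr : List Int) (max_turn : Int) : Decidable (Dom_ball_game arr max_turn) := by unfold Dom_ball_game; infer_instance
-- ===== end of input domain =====

-- B replaces A's turn-by-turn walk by cycle detection plus a modular jump over the remaining turns (alternative algorithm; exact same return value).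

-- ===== PORT A =====
-- A's while loop: one step per turn, break (keeping the current value) on IndexError.
def ballLoopA (arr : List Int) : Nat → Int → Int
  | 0, c => c
  | fuel+1, c =>
    match PySem.List.pyGet? arr c with
    | none => c
    | some v => ballLoopA arr fuel v

def ball_game (arr : List Int) (max_turn : Int) : Int :=
  ballLoopA arr max_turn.toNat 0

-- ===== PORT B =====
-- B's while loop: `seen` maps a position to the step it was first reached, `path` is the
-- trajectory so far; on a repeat, index `path` at start + (max_turn - start) % cycle.
def ballLoopB (arr : List Int) (max_turn : Int) : Nat → Int → Nat → PySem.Dict Int Nat → List Int → Int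
  | 0, c, _, _, _ => c
  | fuel+1, c, step, seen, path =>
    match seen.get? c with
    | some start =>
        (PySem.List.pyGet? path ((start : Int) + PySem.Int.mod (max_turn - (start : Int)) ((step : Int) - (start : Int)))).getD 0
    | none =>
        match PySem.List.pyGet? arr c with
        | none => c
        | some v => ballLoopB arr max_turn fuel v (step+1) (seen.insert c step) (path ++ [c])

def ball_game_alt (arr : List Int) (max_turn : Int) : Int :=
  ballLoopB arr max_turn max_turn.toNat 0 0 PySem.Dict.empty []

-- ===== PRECONDITION & SPEC =====
def Spec_ball_game (arr : List Int) (max_turn : Int) (out : Int) : Prop := out = ball_game_alt arr max_turn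
instance (arr : List Int) (max_turn : Int) (out : Int) : Decidable (Spec_ball_game arr max_turn out) := by unfold Spec_ball_game; infer_instance

-- ===== CLAIM (what is proved, stated in full; the proofs are below) =====
def Claim_equal_ball_game : Prop := ∀ (arr : List Int) (max_turn : Int), Dom_ball_game arr max_turn → Spec_ball_game arr max_turn (ball_game arr max_turn)

-- ===== LEMMAS AND PROOFS =====

-- A's loop is absorbing once the index is out of range.
theorem ballLoopA_stuck (arr : List Int) (n : Nat) (c : Int)
    (h : PySem.List.pyGet? arr c = none) : ballLoopA arr n c = c := by
  cases n with
  | zero => rfl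
  | succ n => simp [ballLoopA, h]

theorem ballLoopA_add (arr : List Int) (m n : Nat) (c : Int) :
    ballLoopA arr (m + n) c = ballLoopA arr n (ballLoopA arr m c) := by
  induction m generalizing c with
  | zero => simp [ballLoopA]
  | succ m ih =>
    cases h : PySem.List.pyGet? arr c with
    | none =>
      simp [show m + 1 + n = (m + n) + 1 by omega, ballLoopA, h,
        ballLoopA_stuck arr n c h]
    | some v =>
      simp [show m + 1 + n = (m + n) + 1 by omega, ballLoopA, h, ih]

theorem ballLoopA_periodic (arr : List Int) (cyc : Nat) (c : Int)
    (h : ballLoopA arr cyc c = c) (q r : Nat) :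
    ballLoopA arr (q * cyc + r) c = ballLoopA arr r c := by
  induction q with
  | zero => simp
  | succ q ih =>
    have : (q + 1) * cyc + r = cyc + (q * cyc + r) := by ring
    rw [this, ballLoopA_add, h, ih]

-- Invariant-carrying correctness of B's loop against A's loop.
theorem ballLoopB_eq (arr : List Int) (max_turn : Int) (fuel : Nat) :
    ∀ (step : Nat) (seen : PySem.Dict Int Nat) (path : List Int),
    step + fuel = max_turn.toNat →
    path = (List.range step).map (fun i => ballLoopA arr i 0) →
    (∀ x s, seen.get? x = some s → s < step ∧ ballLoopA arr s 0 = x) →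
    ballLoopB arr max_turn fuel (ballLoopA arr step 0) step seen path
      = ballLoopA arr max_turn.toNat 0 := by
  induction fuel with
  | zero =>
    intro step seen path hstep _ _
    simp [ballLoopB, ← hstep]
  | succ fuel ih =>
    intro step seen path hstep hpath hseen
    set m := max_turn.toNat with hm
    have hstep_lt : step < m := by omega
    have hmt_pos : (0 : Int) < max_turn := by
      by_contra h
      have : max_turn.toNat = 0 := Int.toNat_of_nonpos (by omega)
      omega
    have hmt_eq : max_turn = (m : Int) := by
      rw [hm, Int.toNat_of_nonneg (le_of_lt hmt_pos)]
    cases h : seen.get? (ballLoopA arr step 0) with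
    | some start =>
      obtain ⟨hlt, heq⟩ := hseen _ _ h
      set cyc := step - start with hcyc
      have hcycpos : 0 < cyc := by omega
      -- the trajectory is periodic with period cyc from step `start`
      have hper : ballLoopA arr cyc (ballLoopA arr step 0) = ballLoopA arr step 0 := by
        conv_lhs => rw [← heq]
        rw [← ballLoopA_add]
        rw [show start + cyc = step by omega]
      -- evaluate the Int arithmetic of the jump
      have hidx : (start : Int) + PySem.Int.mod (max_turn - (start : Int)) ((step : Int) - (start : Int))
          = ((start + (m - start) % cyc : Nat) : Int) := by
        rw [hmt_eq]
        have h1 : ((m : Int) - (start : Int)) = ((m - start : Nat) : Int) := by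
          push_cast [Nat.cast_sub (by omega : start ≤ m)]; ring
        have h2 : ((step : Int) - (start : Int)) = ((cyc : Nat) : Int) := by
          push_cast [hcyc, Nat.cast_sub (by omega : start ≤ step)]; ring
        rw [h1, h2, PySem.Int.mod_natCast]
        push_cast; ring
      set rem := (m - start) % cyc with hrem
      have hrem_lt : rem < cyc := Nat.mod_lt _ hcycpos
      have hidx_lt : start + rem < step := by omega
      -- the value stored in path at that index
      have hget : PySem.List.pyGet? path ((start + rem : Nat) : Int)
          = some (ballLoopA arr (start + rem) 0) := by
        rw [PySem.List.pyGet?_natCast, hpath]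
        rw [List.getElem?_map]
        simp [List.getElem?_range hidx_lt]
      -- and it equals the trajectory at m
      have htraj : ballLoopA arr m 0 = ballLoopA arr (start + rem) 0 := by
        have hd := Nat.div_add_mod (m - start) cyc
        rw [Nat.mul_comm] at hd
        have hsplit : m = start + ((m - start) / cyc * cyc + rem) := by omega
        calc ballLoopA arr m 0
            = ballLoopA arr ((m - start) / cyc * cyc + rem) (ballLoopA arr start 0) := by
              conv_lhs => rw [hsplit]
              rw [ballLoopA_add]
          _ = ballLoopA arr rem (ballLoopA arr start 0) := by
              rw [heq, ballLoopA_periodic arr cyc _ hper]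
          _ = ballLoopA arr (start + rem) 0 := (ballLoopA_add arr start rem 0).symm
      simp only [ballLoopB, h, hidx, hget, Option.getD_some]
      exact htraj.symm
    | none =>
      cases hg : PySem.List.pyGet? arr (ballLoopA arr step 0) with
      | none =>
        have : ballLoopA arr m 0 = ballLoopA arr step 0 := by
          rw [show m = step + (fuel + 1) by omega, ballLoopA_add,
            ballLoopA_stuck arr (fuel + 1) _ hg]
        simp only [ballLoopB, h, hg]
        exact this.symm
      | some v =>
        have hv : ballLoopA arr (step + 1) 0 = v := by
          rw [ballLoopA_add]
          simp [ballLoopA, hg]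
        have := ih (step + 1) (seen.insert (ballLoopA arr step 0) step)
          (path ++ [ballLoopA arr step 0])
          (by omega)
          (by rw [hpath, List.range_succ, List.map_append]; rfl)
          (by
            intro x s hx
            rw [PySem.Dict.get?_insert] at hx
            split_ifs at hx with hxc
            · cases hx
              exact ⟨by omega, hxc ▸ rfl⟩
            · have := hseen _ _ hx
              exact ⟨by omega, this.2⟩)
        rw [hv] at this
        simp only [ballLoopB, h, hg]
        exact this

-- ===== VERDICT (by name: the statement is the Claim_ definition above) =====
theorem ball_game_spec : Claim_equal_ball_game := by
  intro arr max_turn _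
  show ball_game arr max_turn = ball_game_alt arr max_turn
  have := ballLoopB_eq arr max_turn max_turn.toNat 0 PySem.Dict.empty []
    (by omega) (by simp) (by intro x s hx; simp [PySem.Dict.get?_empty] at hx)
  exact this.symm
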